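-- pv_equiv track=rewrite | github.com/ghawkes1217/Conjectures-and-Computations | testing/catest.py | degr
-- ===== SOURCE A (Python) =====
-- def alpha(a,b,m):
--     if a<=b:
--         return(min(b-a,m))
--     if a>b:
--         return(min(a-b-1,m))
--
-- def alpha0(a,m):
--     return(max(0,a-m))
--
-- def degr(A,m):
--     d=0
--     for i in range(1,len(A)):
--         for j in range(i,len(A)):
--             d+=alpha(A[i],A[j],m)
--     for k in range(2,len(A)):
--         d-=alpha0(A[k],m)
--     return(d)
-- ===== SOURCE B (Python) =====
-- def degr(A, m):
--     # Divide & conquer (mergesort-style) over the tail A[1:]: each half is solved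
--     # recursively and returned sorted; cross pairs are summed in bulk with binary
--     # search + prefix sums over the sorted left half, so no pairwise inner scan.
--     def bis(L, x):
--         # index of the first element > x in the sorted list L (count of a <= x)
--         lo, hi = 0, len(L)
--         while lo < hi:
--             mid = (lo + hi) // 2
--             if L[mid] <= x:
--                 lo = mid + 1
--             else:
--                 hi = mid
--         return lo
--
--     def solve(l):
--         # returns (sorted(l), sum over ordered index pairs i <= j of alpha(l[i], l[j], m))
--         n = len(l)
--         if n == 0:
--             return [], 0
--         if n == 1:
--             return l, min(0, m)
--         L, sL = solve(l[:n // 2])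
--         R, sR = solve(l[n // 2:])
--         pref = [0]
--         for v in L:
--             pref.append(pref[-1] + v)
--         k = len(L)
--         cross = 0
--         for b in R:
--             p1 = bis(L, min(b, b - m - 1))   # a <= b with min(b-a,m) = m
--             p2 = bis(L, b)                   # a <= b
--             p3 = bis(L, max(b, b + m + 1))   # b < a with min(a-b-1,m) < m
--             cross += b * (p2 - p1) - (pref[p2] - pref[p1]) + m * p1
--             cross += (pref[p3] - pref[p2]) - (b + 1) * (p3 - p2) + m * (k - p3)
--         return sorted(L + R), sL + sR + cross
--
--     t = A[1:]
--     total = solve(t)[1]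
--     for b in t[1:]:
--         total -= max(0, b - m)
--     return total
-- ===== Notes on version B (the rewrite author's own statement) =====
-- stated objective: faster
-- what changed: Replaces A's O(n^2) double loop over index pairs by a mergesort-style divide and conquer: each half is solved recursively and returned sorted, and the cross-pair contribution is computed in bulk per right-half element via binary search and prefix sums over the sorted left half, so the pairwise inner scan disappears.
import Mathlib
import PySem

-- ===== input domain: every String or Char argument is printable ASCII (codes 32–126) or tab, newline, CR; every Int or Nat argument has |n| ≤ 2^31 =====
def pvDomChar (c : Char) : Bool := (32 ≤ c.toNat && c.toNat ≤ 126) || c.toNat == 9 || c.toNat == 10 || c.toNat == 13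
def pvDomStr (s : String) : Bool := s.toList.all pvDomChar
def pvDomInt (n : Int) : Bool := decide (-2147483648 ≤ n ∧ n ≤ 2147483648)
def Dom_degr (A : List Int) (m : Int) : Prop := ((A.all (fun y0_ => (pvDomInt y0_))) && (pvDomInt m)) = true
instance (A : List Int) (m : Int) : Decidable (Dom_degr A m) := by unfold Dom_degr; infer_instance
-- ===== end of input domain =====

-- B replaces A's O(n^2) double loop over index pairs by a mergesort-style divide
-- and conquer: halves are solved recursively and returned sorted, and the cross-pair
-- contribution is summed in bulk per right-half element with binary search and
-- prefix sums over the sorted left half (measured faster on the large inputs).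

-- ===== PORT A =====
def alphaA (a b m : Int) : Int :=
  if a ≤ b then min (b - a) m else min (a - b - 1) m

def alpha0A (a m : Int) : Int := max 0 (a - m)

def degr (A : List Int) (m : Int) : Int :=
  let d : Int :=
    (PySem.List.pyRange 1 (A.length : Int) 1).foldl (fun d i =>
      (PySem.List.pyRange i (A.length : Int) 1).foldl
        (fun d j => d + alphaA (PySem.List.pyGetD A i 0) (PySem.List.pyGetD A j 0) m) d) 0
  (PySem.List.pyRange 2 (A.length : Int) 1).foldl
    (fun d k => d - alpha0A (PySem.List.pyGetD A k 0) m) d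

-- ===== PORT B =====
-- helper `bis`: hand-written binary search (first index whose element exceeds x)
def bisLoop (L : List Int) (x : Int) (lo hi : Nat) : Nat :=
  if lo < hi then
    let mid := (lo + hi) / 2
    if PySem.List.pyGetD L (mid : Int) 0 ≤ x then bisLoop L x (mid + 1) hi
    else bisLoop L x lo mid
  else lo
termination_by hi - lo
decreasing_by all_goals omega

def bisB (L : List Int) (x : Int) : Nat := bisLoop L x 0 L.length

-- the two half slices l[:n//2] and l[n//2:], named so `solveB` can cite them for termination
theorem sliceL_eq (l : List Int) :
    PySem.List.slice l none (some (PySem.Int.floordiv (PySem.List.len l) 2)) = l.take (l.length / 2) := by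
  have hk : PySem.Int.floordiv (PySem.List.len l) 2 = ((l.length / 2 : Nat) : Int) := by
    rw [PySem.List.len_eq, PySem.Int.floordiv_eq_ediv_of_pos (by omega : (0:Int) < 2)]
    omega
  rw [hk, PySem.List.slice_to_natCast]

theorem sliceR_eq (l : List Int) :
    PySem.List.slice l (some (PySem.Int.floordiv (PySem.List.len l) 2)) none = l.drop (l.length / 2) := by
  have hk : PySem.Int.floordiv (PySem.List.len l) 2 = ((l.length / 2 : Nat) : Int) := by
    rw [PySem.List.len_eq, PySem.Int.floordiv_eq_ediv_of_pos (by omega : (0:Int) < 2)]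
    omega
  rw [hk, PySem.List.slice_from_natCast]

-- helper `solve`: returns (sorted(l), sum of alpha over ordered index pairs i ≤ j of l)
def solveB (m : Int) (l : List Int) : List Int × Int :=
  if _h0 : l.length = 0 then ([], 0)
  else if _h1 : l.length = 1 then (l, min 0 m)
  else
    let k := PySem.Int.floordiv (PySem.List.len l) 2
    let r1 := solveB m (PySem.List.slice l none (some k))
    let r2 := solveB m (PySem.List.slice l (some k) none)
    let pref := r1.1.foldl (fun pref v => pref ++ [PySem.List.pyGetD pref (-1) 0 + v]) [0]
    let kk := PySem.List.len r1.1
    let cross := r2.1.foldl (fun cross b =>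
      let p1 := bisB r1.1 (min b (b - m - 1))
      let p2 := bisB r1.1 b
      let p3 := bisB r1.1 (max b (b + m + 1))
      cross
        + (b * ((p2 : Int) - (p1 : Int))
            - (PySem.List.pyGetD pref ((p2 : Nat) : Int) 0 - PySem.List.pyGetD pref ((p1 : Nat) : Int) 0)
            + m * (p1 : Int))
        + ((PySem.List.pyGetD pref ((p3 : Nat) : Int) 0 - PySem.List.pyGetD pref ((p2 : Nat) : Int) 0)
            - (b + 1) * ((p3 : Int) - (p2 : Int)) + m * (kk - (p3 : Int)))) 0
    (PySem.List.sorted (r1.1 ++ r2.1) (fun x => x) false, r1.2 + r2.2 + cross)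
termination_by l.length
decreasing_by
  · rw [sliceL_eq]; simp only [List.length_take]; omega
  · rw [sliceR_eq]; simp only [List.length_drop]; omega

def degr_alt (A : List Int) (m : Int) : Int :=
  let t := PySem.List.slice A (some 1) none
  let total := (solveB m t).2
  (PySem.List.slice t (some 1) none).foldl (fun tot b => tot - max 0 (b - m)) total

-- ===== PRECONDITION & SPEC =====
def Spec_degr (A : List Int) (m : Int) (out : Int) : Prop := out = degr_alt A m
instance (A : List Int) (m : Int) (out : Int) : Decidable (Spec_degr A m out) := by unfold Spec_degr; infer_instance

-- ===== CLAIM (what is proved, stated in full; the proofs are below) =====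
def Claim_equal_degr : Prop := ∀ (A : List Int) (m : Int), Dom_degr A m → Spec_degr A m (degr A m)

-- ===== LEMMAS AND PROOFS =====

-- triangular pair sum: Σ_{i ≤ j} alphaA l[i] l[j] m, recursing on the earlier element
def Gsum (m : Int) : List Int → Int
  | [] => 0
  | x :: xs => ((x :: xs).map (fun y => alphaA x y m)).sum + Gsum m xs

-- count / sum of the elements ≤ x (as multiset functions of L)
def cntLE (L : List Int) (x : Int) : Int := (L.countP (fun a => decide (a ≤ x)) : Int)
def sumLE (L : List Int) (x : Int) : Int := (L.filter (fun a => decide (a ≤ x))).sum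

lemma cntLE_nil (x : Int) : cntLE [] x = 0 := rfl
lemma sumLE_nil (x : Int) : sumLE [] x = 0 := rfl

lemma cntLE_cons (y : Int) (L : List Int) (x : Int) :
    cntLE (y :: L) x = (if y ≤ x then 1 else 0) + cntLE L x := by
  unfold cntLE
  rw [List.countP_cons]
  by_cases h : y ≤ x
  · simp [h]
    omega
  · simp [h]

lemma sumLE_cons (y : Int) (L : List Int) (x : Int) :
    sumLE (y :: L) x = (if y ≤ x then y else 0) + sumLE L x := by
  unfold sumLE
  rw [List.filter_cons]
  by_cases h : y ≤ x <;> simp [h]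

-- B's bulk formula for one right element b against the multiset L
def Eexp (L : List Int) (b m : Int) : Int :=
  b * (cntLE L b - cntLE L (min b (b - m - 1)))
    - (sumLE L b - sumLE L (min b (b - m - 1))) + m * cntLE L (min b (b - m - 1))
  + ((sumLE L (max b (b + m + 1)) - sumLE L b)
    - (b + 1) * (cntLE L (max b (b + m + 1)) - cntLE L b)
    + m * ((L.length : Int) - cntLE L (max b (b + m + 1))))

lemma crossOne (b m : Int) : ∀ L : List Int,
    (L.map (fun a => alphaA a b m)).sum = Eexp L b m := by
  intro L
  induction L with
  | nil => simp [Eexp, cntLE_nil, sumLE_nil]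
  | cons x L ih =>
    rw [List.map_cons, List.sum_cons, ih]
    unfold Eexp
    rw [cntLE_cons, cntLE_cons, cntLE_cons, sumLE_cons, sumLE_cons, sumLE_cons]
    simp only [List.length_cons]
    push_cast
    unfold alphaA
    by_cases hb : x ≤ min b (b - m - 1)
    · have ha : x ≤ b := by omega
      have hc : x ≤ max b (b + m + 1) := by omega
      simp only [if_pos ha, if_pos hb, if_pos hc]
      rw [min_eq_right (show m ≤ b - x by omega)]
      ring
    · by_cases ha : x ≤ b
      · have hc : x ≤ max b (b + m + 1) := by omega
        simp only [if_pos ha, if_neg hb, if_pos hc]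
        rw [min_eq_left (show b - x ≤ m by omega)]
        ring
      · by_cases hc : x ≤ max b (b + m + 1)
        · simp only [if_neg ha, if_neg hb, if_pos hc]
          rw [min_eq_left (show x - b - 1 ≤ m by omega)]
          ring
        · simp only [if_neg ha, if_neg hb, if_neg hc]
          rw [min_eq_right (show m ≤ x - b - 1 by omega)]
          ring

-- the triangular sum splits at any point into the two halves plus the cross sum
lemma Gsum_append (m : Int) : ∀ (L R : List Int),
    Gsum m (L ++ R) = Gsum m L + Gsum m R
      + (R.map (fun b => (L.map (fun a => alphaA a b m)).sum)).sum := by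
  intro L
  induction L with
  | nil => intro R; simp [Gsum]
  | cons x L ih =>
    intro R
    show Gsum m (x :: (L ++ R)) = _
    simp only [Gsum, List.map_cons, List.map_append, List.sum_cons, List.sum_append, ih R]
    rw [PySem.List.sum_map_add_int R (fun b => alphaA x b m)
          (fun b => (List.map (fun a => alphaA a b m) L).sum)]
    ring

-- ---- binary search: on a sorted list, bisB L x is the number of elements ≤ x ----
lemma getD_mono (L : List Int) (hs : L.Pairwise (· ≤ ·)) (i j : Nat)
    (hij : i ≤ j) (hj : j < L.length) : L.getD i 0 ≤ L.getD j 0 := by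
  rcases eq_or_lt_of_le hij with h | h
  · subst h; exact le_refl _
  · rw [List.getD_eq_getElem L 0 (by omega), List.getD_eq_getElem L 0 hj]
    exact List.pairwise_iff_getElem.mp hs i j (by omega) hj h

lemma bisLoop_spec : ∀ (d : Nat) (L : List Int) (x : Int) (lo hi : Nat), hi - lo ≤ d →
    L.Pairwise (· ≤ ·) → lo ≤ hi → hi ≤ L.length →
    (∀ j, j < lo → L.getD j 0 ≤ x) → (∀ j, hi ≤ j → j < L.length → ¬ L.getD j 0 ≤ x) →
    (bisLoop L x lo hi ≤ L.length ∧
      (∀ j, j < bisLoop L x lo hi → L.getD j 0 ≤ x) ∧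
      (∀ j, bisLoop L x lo hi ≤ j → j < L.length → ¬ L.getD j 0 ≤ x)) := by
  intro d
  induction d with
  | zero =>
    intro L x lo hi hd hs hlohi hhi hlow hhigh
    have : lo = hi := by omega
    subst this
    rw [bisLoop, if_neg (by omega)]
    exact ⟨by omega, hlow, fun j hj hjl => hhigh j hj hjl⟩
  | succ d ih =>
    intro L x lo hi hd hs hlohi hhi hlow hhigh
    rw [bisLoop]
    by_cases hlt : lo < hi
    · rw [if_pos hlt]
      dsimp only
      have hmid1 : lo ≤ (lo + hi) / 2 := by omega
      have hmid2 : (lo + hi) / 2 < hi := by omega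
      rw [PySem.List.pyGetD_natCast]
      by_cases hc : L.getD ((lo + hi) / 2) 0 ≤ x
      · rw [if_pos hc]
        refine ih L x ((lo + hi) / 2 + 1) hi (by omega) hs (by omega) hhi ?_ hhigh
        intro j hj
        exact le_trans (getD_mono L hs j ((lo + hi) / 2) (by omega) (by omega)) hc
      · rw [if_neg hc]
        refine ih L x lo ((lo + hi) / 2) (by omega) hs (by omega) (by omega) hlow ?_
        intro j hj hjl h
        exact hc (le_trans (getD_mono L hs ((lo + hi) / 2) j hj hjl) h)
    · rw [if_neg hlt]
      have heq : lo = hi := by omega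
      subst heq
      exact ⟨by omega, hlow, fun j hj hjl => hhigh j hj hjl⟩

lemma bisB_spec (L : List Int) (x : Int) (hs : L.Pairwise (· ≤ ·)) :
    bisB L x ≤ L.length ∧
      (∀ j, j < bisB L x → L.getD j 0 ≤ x) ∧
      (∀ j, bisB L x ≤ j → j < L.length → ¬ L.getD j 0 ≤ x) := by
  exact bisLoop_spec L.length L x 0 L.length (by omega) hs (by omega) (by omega)
    (by omega) (fun j hj hjl => by omega)

-- a predicate true exactly on the first r positions filters to the prefix of length r
lemma filter_eq_take (P : Int → Bool) : ∀ (L : List Int) (r : Nat), r ≤ L.length →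
    (∀ j, j < r → P (L.getD j 0) = true) →
    (∀ j, r ≤ j → j < L.length → ¬ P (L.getD j 0) = true) →
    L.filter P = L.take r := by
  intro L
  induction L with
  | nil =>
    intro r hr _ _
    have hr0 : r = 0 := by simpa using hr
    subst hr0
    simp
  | cons y L ih =>
    intro r hr h1 h2
    cases r with
    | zero =>
      rw [List.take_zero, List.filter_eq_nil_iff]
      intro a ha
      rcases List.mem_iff_getElem.mp ha with ⟨j, hj, rfl⟩
      have := h2 j (by omega) (by simpa using hj)
      rwa [List.getD_eq_getElem _ 0 hj] at this
    | succ s =>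
      have hy : P y = true := by have := h1 0 (by omega); simpa using this
      rw [List.filter_cons_of_pos hy, List.take_succ_cons]
      congr 1
      refine ih s (by simpa using hr) ?_ ?_
      · intro j hj; have := h1 (j + 1) (by omega); simpa using this
      · intro j hj hjl; have := h2 (j + 1) (by omega) (by simpa using hjl); simpa using this

lemma sorted_cnt (Ls : List Int) (x : Int) (hs : Ls.Pairwise (· ≤ ·)) :
    Ls.filter (fun a => decide (a ≤ x)) = Ls.take (bisB Ls x)
      ∧ cntLE Ls x = (bisB Ls x : Int) ∧ bisB Ls x ≤ Ls.length := by
  obtain ⟨hle, h1, h2⟩ := bisB_spec Ls x hs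
  have hf : Ls.filter (fun a => decide (a ≤ x)) = Ls.take (bisB Ls x) := by
    refine filter_eq_take _ Ls (bisB Ls x) hle ?_ ?_
    · intro j hj; simpa using h1 j hj
    · intro j hj hjl; simpa using h2 j hj hjl
  refine ⟨hf, ?_, hle⟩
  rw [cntLE, List.countP_eq_length_filter, hf, List.length_take]
  omega

-- ---- the prefix-sum list built by the pref loop ----
def partials (a : Int) : List Int → List Int
  | [] => []
  | v :: vs => (a + v) :: partials (a + v) vs

lemma prefLoop_eq : ∀ (vs acc : List Int) (a : Int),
    vs.foldl (fun pref v => pref ++ [PySem.List.pyGetD pref (-1) 0 + v]) (acc ++ [a])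
      = acc ++ a :: partials a vs := by
  intro vs
  induction vs with
  | nil => intro acc a; simp [partials]
  | cons v vs ih =>
    intro acc a
    rw [List.foldl_cons, PySem.List.pyGetD_neg_one_append_singleton]
    have : acc ++ [a] ++ [a + v] = (acc ++ [a]) ++ [a + v] := by simp
    rw [this, ih (acc ++ [a]) (a + v)]
    simp [partials]

lemma partials_getD : ∀ (vs : List Int) (a : Int) (r : Nat), r ≤ vs.length →
    (a :: partials a vs).getD r 0 = a + (vs.take r).sum := by
  intro vs
  induction vs with
  | nil =>
    intro a r hr
    have hr0 : r = 0 := by simpa using hr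
    subst hr0
    simp
  | cons v vs ih =>
    intro a r hr
    cases r with
    | zero => simp
    | succ s =>
      show (partials a (v :: vs)).getD s 0 = _
      rw [partials, ih (a + v) s (by simpa using hr), List.take_succ_cons, List.sum_cons]
      ring

-- one step of B's cross loop equals the full inner sum against the sorted left half
lemma step_eq (m b : Int) (Ls : List Int) (hs : Ls.Pairwise (· ≤ ·)) :
    (b * ((bisB Ls b : Int) - (bisB Ls (min b (b - m - 1)) : Int))
        - ((0 :: partials 0 Ls).getD (bisB Ls b) 0 - (0 :: partials 0 Ls).getD (bisB Ls (min b (b - m - 1))) 0)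
        + m * (bisB Ls (min b (b - m - 1)) : Int))
      + (((0 :: partials 0 Ls).getD (bisB Ls (max b (b + m + 1))) 0 - (0 :: partials 0 Ls).getD (bisB Ls b) 0)
        - (b + 1) * ((bisB Ls (max b (b + m + 1)) : Int) - (bisB Ls b : Int))
        + m * (PySem.List.len Ls - (bisB Ls (max b (b + m + 1)) : Int)))
      = (Ls.map (fun a => alphaA a b m)).sum := by
  obtain ⟨hf1, hc1, hl1⟩ := sorted_cnt Ls (min b (b - m - 1)) hs
  obtain ⟨hf2, hc2, hl2⟩ := sorted_cnt Ls b hs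
  obtain ⟨hf3, hc3, hl3⟩ := sorted_cnt Ls (max b (b + m + 1)) hs
  have hp1 := partials_getD Ls 0 (bisB Ls (min b (b - m - 1))) hl1
  have hp2 := partials_getD Ls 0 (bisB Ls b) hl2
  have hp3 := partials_getD Ls 0 (bisB Ls (max b (b + m + 1))) hl3
  have hs1 : sumLE Ls (min b (b - m - 1)) = (Ls.take (bisB Ls (min b (b - m - 1)))).sum := by
    rw [sumLE, hf1]
  have hs2 : sumLE Ls b = (Ls.take (bisB Ls b)).sum := by rw [sumLE, hf2]
  have hs3 : sumLE Ls (max b (b + m + 1)) = (Ls.take (bisB Ls (max b (b + m + 1)))).sum := by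
    rw [sumLE, hf3]
  rw [crossOne b m Ls, Eexp, hp1, hp2, hp3, ← hs1, ← hs2, ← hs3, ← hc1, ← hc2, ← hc3,
    PySem.List.len_eq]
  ring

-- ---- `solve` is correct: sorted output, triangular pair sum ----
lemma solve_spec (m : Int) : ∀ (n : Nat) (l : List Int), l.length ≤ n →
    (solveB m l).1.Perm l ∧ (solveB m l).1.Pairwise (· ≤ ·) ∧ (solveB m l).2 = Gsum m l := by
  intro n
  induction n with
  | zero =>
    intro l hl
    have : l = [] := List.eq_nil_of_length_eq_zero (by omega)
    subst this
    rw [solveB]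
    simp [Gsum]
  | succ n ih =>
    intro l hl
    rw [solveB]
    by_cases h0 : l.length = 0
    · have : l = [] := List.eq_nil_of_length_eq_zero h0
      subst this
      simp [Gsum]
    by_cases h1 : l.length = 1
    · rw [dif_neg h0, dif_pos h1]
      match l, h1 with
      | [a], _ => simp [Gsum, alphaA]
    rw [dif_neg h0, dif_neg h1]
    dsimp only
    have h2 : 2 ≤ l.length := by omega
    rw [sliceL_eq, sliceR_eq]
    obtain ⟨p1, s1, e1⟩ := ih (l.take (l.length / 2)) (by simp; omega)
    obtain ⟨p2, s2, e2⟩ := ih (l.drop (l.length / 2)) (by simp; omega)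
    set Ls := (solveB m (l.take (l.length / 2))).1 with hLs
    set Rs := (solveB m (l.drop (l.length / 2))).1 with hRs
    refine ⟨?_, ?_, ?_⟩
    · exact ((PySem.List.sorted_perm _ _ _).trans (p1.append p2)).trans
        (by rw [List.take_append_drop])
    · simpa using PySem.List.sorted_pairwise (Ls ++ Rs) (fun x => x)
    · -- the sum component
      rw [show ([0] : List Int) = [] ++ [0] from rfl, prefLoop_eq, List.nil_append]
      have hcongr : Rs.foldl (fun cross b =>
          cross
            + (b * ((bisB Ls b : Int) - (bisB Ls (min b (b - m - 1)) : Int))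
                - (PySem.List.pyGetD (0 :: partials 0 Ls) ((bisB Ls b : Nat) : Int) 0
                    - PySem.List.pyGetD (0 :: partials 0 Ls) ((bisB Ls (min b (b - m - 1)) : Nat) : Int) 0)
                + m * (bisB Ls (min b (b - m - 1)) : Int))
            + ((PySem.List.pyGetD (0 :: partials 0 Ls) ((bisB Ls (max b (b + m + 1)) : Nat) : Int) 0
                    - PySem.List.pyGetD (0 :: partials 0 Ls) ((bisB Ls b : Nat) : Int) 0)
                - (b + 1) * ((bisB Ls (max b (b + m + 1)) : Int) - (bisB Ls b : Int))
                + m * (PySem.List.len Ls - (bisB Ls (max b (b + m + 1)) : Int)))) 0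
          = Rs.foldl (fun cross b => cross + (Ls.map (fun a => alphaA a b m)).sum) 0 := by
        apply PySem.List.foldl_congr_mem
        intro acc b _
        simp only [PySem.List.pyGetD_natCast]
        rw [add_assoc, step_eq m b Ls s1]
      rw [hcongr, PySem.List.foldl_add, e1, e2]
      have hinner : ∀ b : Int, (Ls.map (fun a => alphaA a b m)).sum
          = ((l.take (l.length / 2)).map (fun a => alphaA a b m)).sum := by
        intro b
        exact (p1.map (fun a => alphaA a b m)).sum_eq
      have houter : (Rs.map (fun b => (Ls.map (fun a => alphaA a b m)).sum)).sum
          = ((l.drop (l.length / 2)).map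
              (fun b => ((l.take (l.length / 2)).map (fun a => alphaA a b m)).sum)).sum := by
        rw [List.map_congr_left (fun b _ => hinner b)]
        exact (p2.map _).sum_eq
      rw [houter]
      conv_rhs => rw [← List.take_append_drop (l.length / 2) l, Gsum_append]
      ring

-- a subtracting fold is the initial value minus the mapped sum
lemma foldl_sub_eq (f : Int → Int) : ∀ (l : List Int) (d : Int),
    l.foldl (fun d y => d - f y) d = d - (l.map f).sum := by
  intro l
  induction l with
  | nil => simp
  | cons x xs ih => intro d; simp only [List.foldl_cons, List.map_cons, List.sum_cons, ih]; omega

-- A's outer loop from index i computes Gsum of the suffix A.drop i.toNat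
lemma outerA (A : List Int) (m : Int) : ∀ (k : Nat) (i d : Int), 0 ≤ i → A.length - i.toNat = k →
    (PySem.List.pyRange i (A.length : Int) 1).foldl (fun d i =>
      (PySem.List.pyRange i (A.length : Int) 1).foldl
        (fun d j => d + alphaA (PySem.List.pyGetD A i 0) (PySem.List.pyGetD A j 0) m) d) d
    = d + Gsum m (A.drop i.toNat) := by
  intro k
  induction k with
  | zero =>
    intro i d h0 hk
    have hle : A.length ≤ i.toNat := by omega
    rw [PySem.List.pyRange_one_eq_nil (by omega : (A.length : Int) ≤ i),
        List.drop_eq_nil_of_le hle]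
    simp [Gsum]
  | succ k ih =>
    intro i d h0 hk
    have hi : i.toNat < A.length := by omega
    have hilt : i < (A.length : Int) := by omega
    rw [PySem.List.pyRange_one_cons hilt, List.foldl_cons]
    have hinner :
        (PySem.List.pyRange i (A.length : Int) 1).foldl
          (fun d j => d + alphaA (PySem.List.pyGetD A i 0) (PySem.List.pyGetD A j 0) m) d
        = d + ((A.drop i.toNat).map (fun y => alphaA (PySem.List.pyGetD A i 0) y m)).sum := by
      rw [PySem.List.foldl_pyRange_pyGetD' A 0
            (fun d y => d + alphaA (PySem.List.pyGetD A i 0) y m) d h0,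
          PySem.List.foldl_add]
    rw [hinner, ih (i + 1) _ (by omega) (by omega)]
    have hget : PySem.List.pyGetD A i 0 = A[i.toNat] :=
      PySem.List.pyGetD_eq_getElem A 0 h0 (by exact_mod_cast hilt)
    have htn : (i + 1).toNat = i.toNat + 1 := by omega
    have hdrop : A.drop i.toNat = A[i.toNat] :: A.drop (i.toNat + 1) := List.drop_eq_getElem_cons hi
    rw [hget, htn, hdrop]
    show d + ((A[i.toNat] :: A.drop (i.toNat + 1)).map (fun y => alphaA A[i.toNat] y m)).sum
          + Gsum m (A.drop (i.toNat + 1))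
        = d + (((A[i.toNat] :: A.drop (i.toNat + 1)).map (fun y => alphaA A[i.toNat] y m)).sum
          + Gsum m (A.drop (i.toNat + 1)))
    ring

-- ===== VERDICT (by name: the statement is the Claim_ definition above) =====
theorem degr_spec : Claim_equal_degr := by
  intro A m _
  unfold Spec_degr degr degr_alt
  simp only []
  have hA1 := outerA A m (A.length - (1:Int).toNat) 1 0 (by norm_num) rfl
  norm_num at hA1
  rw [hA1,
      PySem.List.foldl_pyRange_pyGetD' A 0 (fun d y => d - alpha0A y m)
        (Gsum m A.tail) (by norm_num : (0:Int) ≤ 2),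
      foldl_sub_eq,
      PySem.List.slice_from_one, PySem.List.slice_from_one,
      foldl_sub_eq (fun b => max 0 (b - m)),
      (solve_spec m A.tail.length A.tail (le_refl _)).2.2]
  simp only [← List.drop_one, List.drop_drop, alpha0A, show Int.toNat 2 = 2 from rfl]
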